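-- pv_equiv track=rewrite | github.com/KAdamczykk/LearningPY | funkcje listy losowosc/l4-iad 21.py | concatenate_abundants_from_range
-- ===== SOURCE A (Python) =====
-- import math
--
-- def concatenate_abundants_from_range(poczatek_przedzialu, koniec_przedzialu):
--     if poczatek_przedzialu == math.nan and koniec_przedzialu== math.nan:
--         return poczatek_przedzialu == math.nan, koniec_przedzialu == math.nan
--     else:
--         suma_zlozen = 0
--         nadmiarowe =0
--         for i in range(poczatek_przedzialu, koniec_przedzialu + 1):
--             for j in range (1,i):
--                 if i%j==0:
--                     suma_zlozen+=j
--                     j+=1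
--                 else:
--                     j+=1
--             if suma_zlozen>i:
--                 nadmiarowe = nadmiarowe*100 + i
--                 i+1
--                 suma_zlozen=0
--             else:
--                 i+=1
--                 suma_zlozen=0
--     return nadmiarowe
-- ===== SOURCE B (Python) =====
-- def concatenate_abundants_from_range(poczatek_przedzialu, koniec_przedzialu):
--     def proper_divisor_sum(n):
--         # sum of proper divisors via trial division up to sqrt(n), pairing d with n//d; 0 for n < 2
--         if n < 2:
--             return 0
--         total = 1
--         d = 2
--         while d * d <= n:
--             if n % d == 0:
--                 total += d
--                 q = n // d
--                 if q != d:
--                     total += q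
--             d += 1
--         return total
--     acc = 0
--     for i in range(poczatek_przedzialu, koniec_przedzialu + 1):
--         if proper_divisor_sum(i) > i:
--             acc = acc * 100 + i
--     return acc
-- ===== Notes on version B (the rewrite author's own statement) =====
-- stated objective: alternative
-- what changed: B computes each proper-divisor sum by trial division up to sqrt(i) with paired divisors d and i//d, instead of A's full scan over all j in [1,i); the accumulator logic (acc*100+i for abundant i) is a single clean fold.
import Mathlib
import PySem

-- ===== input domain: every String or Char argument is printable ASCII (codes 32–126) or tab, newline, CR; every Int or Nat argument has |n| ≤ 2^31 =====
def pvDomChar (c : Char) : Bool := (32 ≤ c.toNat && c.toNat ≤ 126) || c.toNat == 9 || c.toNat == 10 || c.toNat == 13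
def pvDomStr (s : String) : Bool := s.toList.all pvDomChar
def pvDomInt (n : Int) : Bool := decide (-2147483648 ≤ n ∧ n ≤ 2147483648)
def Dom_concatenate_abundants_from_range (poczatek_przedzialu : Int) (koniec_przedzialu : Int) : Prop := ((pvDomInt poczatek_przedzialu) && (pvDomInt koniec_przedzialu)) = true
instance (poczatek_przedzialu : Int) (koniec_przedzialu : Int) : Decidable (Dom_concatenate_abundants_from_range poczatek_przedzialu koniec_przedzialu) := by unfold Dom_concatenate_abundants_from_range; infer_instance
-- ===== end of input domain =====

-- B replaces A's full scan over j ∈ [1,i) by trial division up to √i with paired divisors d and i//d.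

-- ===== PORT A =====
-- Literal port of A. A's leading 'if p == math.nan and k == math.nan' is always False on int
-- inputs (x == math.nan is False for every x), so the ported code is the else branch.
-- The inner 'j += 1' statements and the bare 'i+1' / 'i += 1' are no-ops in Python's for loop
-- (the loop variable is reassigned by the iterator); 'suma_zlozen = 0' resets the sum each turn.
def concatenate_abundants_from_range (poczatek_przedzialu : Int) (koniec_przedzialu : Int) : Int :=
  ((PySem.List.pyRange poczatek_przedzialu (koniec_przedzialu + 1) 1).foldl
    (fun (st : Int × Int) i =>
      let suma := (PySem.List.pyRange 1 i 1).foldl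
        (fun s j => if PySem.Int.mod i j = 0 then s + j else s) st.1
      if suma > i then (0, st.2 * 100 + i) else (0, st.2))
    (0, 0)).2

-- ===== PORT B =====
-- B's inner while-loop: d runs upward while d*d ≤ n, adding d and the cofactor n//d (once if equal).
def pvSigmaLoop (n : Int) (total : Int) (d : Nat) : Int :=
  if h : (d : Int) * (d : Int) ≤ n then
    pvSigmaLoop n
      (if PySem.Int.mod n d = 0 then
        total + d + (if PySem.Int.floordiv n d ≠ (d : Int) then PySem.Int.floordiv n d else 0)
      else total)
      (d + 1)
  else total
termination_by n.toNat + 1 - d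
decreasing_by
  have hd : (d : Int) ≤ n := le_trans (by nlinarith [Int.natCast_nonneg d]) h
  omega

def pvProperDivSum (n : Int) : Int :=
  if n < 2 then 0 else pvSigmaLoop n 1 2

def concatenate_abundants_from_range_alt (poczatek_przedzialu : Int) (koniec_przedzialu : Int) : Int :=
  (PySem.List.pyRange poczatek_przedzialu (koniec_przedzialu + 1) 1).foldl
    (fun acc i => if pvProperDivSum i > i then acc * 100 + i else acc) 0

-- ===== PRECONDITION & SPEC =====
def Spec_concatenate_abundants_from_range (poczatek_przedzialu : Int) (koniec_przedzialu : Int) (out : Int) : Prop := out = concatenate_abundants_from_range_alt poczatek_przedzialu koniec_przedzialu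
instance (poczatek_przedzialu : Int) (koniec_przedzialu : Int) (out : Int) : Decidable (Spec_concatenate_abundants_from_range poczatek_przedzialu koniec_przedzialu out) := by unfold Spec_concatenate_abundants_from_range; infer_instance

-- ===== CLAIM (what is proved, stated in full; the proofs are below) =====
def Claim_equal_concatenate_abundants_from_range : Prop := ∀ (poczatek_przedzialu : Int) (koniec_przedzialu : Int), Dom_concatenate_abundants_from_range poczatek_przedzialu koniec_przedzialu → Spec_concatenate_abundants_from_range poczatek_przedzialu koniec_przedzialu (concatenate_abundants_from_range poczatek_przedzialu koniec_przedzialu)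

-- ===== LEMMAS AND PROOFS =====

-- A's per-number divisor sum as a Finset sum over j ∈ [1,n).
def pvGsum (N : Nat) : Int := ∑ j ∈ Finset.Ico 1 N, (if j ∣ N then (j : Int) else 0)

-- B's per-step summand: divisor e and its cofactor N/e (counted once when equal).
def pvGB (N : Nat) (e : Nat) : Int :=
  if e ∣ N then (e : Int) + (if N / e ≠ e then ((N / e : Nat) : Int) else 0) else 0

lemma pvA_inner_fold (N : Nat) : ∀ (n : Nat) (s : Int),
    (PySem.List.pyRange 1 (n : Int) 1).foldl
      (fun s j => if PySem.Int.mod (N : Int) j = 0 then s + j else s) s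
    = s + ∑ j ∈ Finset.Ico 1 n, (if j ∣ N then (j : Int) else 0) := by
  intro n
  induction n with
  | zero => intro s; rw [PySem.List.pyRange_one_eq_nil (by norm_num)]; simp
  | succ n ih =>
    intro s
    by_cases hn : n = 0
    · subst hn
      rw [show ((1:Nat) : Int) = (1:Int) by norm_num]
      rw [PySem.List.pyRange_one_eq_nil (by norm_num)]
      simp
    · have h1 : (1:Int) ≤ (n : Int) := by omega
      have hcast : ((n + 1 : Nat) : Int) = (n : Int) + 1 := by push_cast; ring
      rw [hcast, PySem.List.pyRange_one_succ_right h1, List.foldl_append]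
      rw [ih s]
      rw [Finset.sum_Ico_succ_top (by omega)]
      simp only [List.foldl_cons, List.foldl_nil]
      rw [PySem.Int.mod_natCast N n]
      have hmz : N % n = 0 ↔ n ∣ N := Iff.symm Nat.dvd_iff_mod_eq_zero
      by_cases hd : n ∣ N
      · rw [if_pos (by exact_mod_cast hmz.mpr hd), if_pos hd]; ring
      · rw [if_neg (by exact_mod_cast fun h => hd (hmz.mp (by exact_mod_cast h))), if_neg hd]
        ring

lemma pvSigmaLoop_sum (N : Nat) : ∀ (m : Nat) (d : Nat) (t : Int), 1 ≤ d → m = Nat.sqrt N + 1 - d →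
    pvSigmaLoop (N : Int) t d = t + ∑ e ∈ Finset.Ico d (Nat.sqrt N + 1), pvGB N e := by
  intro m
  induction m with
  | zero =>
    intro d t hd hm
    have hds : Nat.sqrt N + 1 ≤ d := by omega
    rw [pvSigmaLoop]
    rw [dif_neg (by
      intro hle
      have : d * d ≤ N := by exact_mod_cast hle
      have : d ≤ Nat.sqrt N := Nat.le_sqrt.mpr this
      omega)]
    rw [Finset.Ico_eq_empty (by omega)]
    simp
  | succ m ih =>
    intro d t hd hm
    rw [pvSigmaLoop]
    by_cases hle : (d : Int) * (d : Int) ≤ (N : Int)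
    · have hdd : d * d ≤ N := by exact_mod_cast hle
      have hds : d ≤ Nat.sqrt N := Nat.le_sqrt.mpr hdd
      rw [dif_pos hle]
      rw [ih (d+1) _ (by omega) (by omega)]
      conv_rhs => rw [Finset.sum_eq_sum_Ico_succ_bot (show d < Nat.sqrt N + 1 by omega) (pvGB N)]
      rw [PySem.Int.mod_natCast N d, PySem.Int.floordiv_natCast N d]
      unfold pvGB
      have hmz : N % d = 0 ↔ d ∣ N := Iff.symm Nat.dvd_iff_mod_eq_zero
      by_cases hdvd : d ∣ N
      · rw [if_pos (by exact_mod_cast hmz.mpr hdvd), if_pos hdvd]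
        by_cases hq : N / d = d
        · rw [if_neg (by simp [hq]), if_neg (by simp [hq])]
          ring
        · rw [if_pos (by exact_mod_cast hq), if_pos hq]
          ring
      · rw [if_neg (by exact_mod_cast fun h => hdvd (hmz.mp (by exact_mod_cast h))), if_neg hdvd]
        ring
    · have : Nat.sqrt N < d := by
        rcases Nat.lt_or_ge (Nat.sqrt N) d with h | h
        · exact h
        · exact absurd (by exact_mod_cast Nat.le_sqrt.mp h) hle
      rw [dif_neg hle, Finset.Ico_eq_empty (by omega)]
      simp

lemma pvPairing (N : Nat) (h2 : 2 ≤ N) :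
    1 + ∑ e ∈ Finset.Ico 2 (Nat.sqrt N + 1), pvGB N e = pvGsum N := by
  have hN0 : N ≠ 0 := by omega
  -- split pvGB into the divisor part and the cofactor part
  have hsplit : ∀ e, pvGB N e =
      (if e ∣ N then (e : Int) else 0)
      + (if e ∣ N ∧ N / e ≠ e then ((N / e : Nat) : Int) else 0) := by
    intro e
    unfold pvGB
    by_cases hd : e ∣ N
    · by_cases hq : N / e ≠ e <;> simp [hd, hq]
    · simp [hd]
  rw [Finset.sum_congr rfl (fun e _ => hsplit e), Finset.sum_add_distrib]
  rw [← Finset.sum_filter (fun e => e ∣ N) (fun e => (e : Int))]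
  rw [← Finset.sum_filter (fun e => e ∣ N ∧ N / e ≠ e) (fun e => ((N / e : Nat) : Int))]
  unfold pvGsum
  rw [← Finset.sum_filter (fun j => j ∣ N) (fun j => (j : Int))]
  rw [← Finset.sum_filter_add_sum_filter_not ((Finset.Ico 1 N).filter (fun j => j ∣ N))
        (fun e => e * e ≤ N) (fun e => (e : Int))]
  -- small part: {e ∣ N, e*e ≤ N, 1 ≤ e < N} = insert 1 (filter over Ico 2 (√N+1))
  have hsmall : (((Finset.Ico 1 N).filter (fun j => j ∣ N)).filter (fun e => e * e ≤ N))
      = insert 1 ((Finset.Ico 2 (Nat.sqrt N + 1)).filter (fun e => e ∣ N)) := by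
    ext e
    simp only [Finset.mem_filter, Finset.mem_Ico, Finset.mem_insert]
    constructor
    · rintro ⟨⟨⟨h1, _⟩, hdvd⟩, hsq⟩
      by_cases he1 : e = 1
      · exact Or.inl he1
      · exact Or.inr ⟨⟨by omega, by have := Nat.le_sqrt.mpr hsq; omega⟩, hdvd⟩
    · rintro (rfl | ⟨⟨he2, hes⟩, hdvd⟩)
      · exact ⟨⟨⟨le_refl 1, by omega⟩, one_dvd N⟩, by omega⟩
      · have hsq : e * e ≤ N := Nat.le_sqrt.mp (by omega)
        have heN : e < N := by
          have : 2 * e ≤ e * e := by nlinarith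
          omega
        exact ⟨⟨⟨by omega, heN⟩, hdvd⟩, hsq⟩
  rw [hsmall, Finset.sum_insert (by simp)]
  -- large part: cofactor sum over the small divisors e (with N/e ≠ e) equals the sum over large divisors
  have hlarge : ∑ e ∈ (Finset.Ico 2 (Nat.sqrt N + 1)).filter (fun e => e ∣ N ∧ N / e ≠ e),
        ((N / e : Nat) : Int)
      = ∑ f ∈ ((Finset.Ico 1 N).filter (fun j => j ∣ N)).filter (fun e => ¬ e * e ≤ N),
        (f : Int) := by
    apply Finset.sum_nbij' (i := fun e => N / e) (j := fun f => N / f)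
    · intro e he
      simp only [Finset.mem_filter, Finset.mem_Ico] at he ⊢
      obtain ⟨⟨he2, hes⟩, hdvd, hne⟩ := he
      have hmul : e * (N / e) = N := Nat.mul_div_cancel' hdvd
      have hsq : e * e ≤ N := Nat.le_sqrt.mp (by omega)
      have hle : e ≤ N / e :=
        Nat.le_of_mul_le_mul_left (by rw [hmul]; exact hsq) (by omega)
      have helt : e < N / e := lt_of_le_of_ne hle (Ne.symm hne)
      refine ⟨⟨⟨by omega, Nat.div_lt_self (by omega) (by omega)⟩, Nat.div_dvd_of_dvd hdvd⟩, ?_⟩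
      intro hcon
      nlinarith [hmul, helt, hcon]
    · intro f hf
      simp only [Finset.mem_filter, Finset.mem_Ico] at hf ⊢
      obtain ⟨⟨⟨hf1, hfN⟩, hdvd⟩, hbig⟩ := hf
      have hmul : f * (N / f) = N := Nat.mul_div_cancel' hdvd
      have he1 : 1 ≤ N / f := Nat.one_le_div_iff (by omega) |>.mpr (Nat.le_of_dvd (by omega) hdvd)
      have he2 : 2 ≤ N / f := by
        rcases Nat.lt_or_ge (N / f) 2 with h | h
        · have h01 : N / f = 0 ∨ N / f = 1 := by omega
          rcases h01 with h0 | h1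
          · rw [h0, Nat.mul_zero] at hmul; omega
          · rw [h1, Nat.mul_one] at hmul; omega
        · exact h
      have helt : N / f < f := by
        apply Nat.lt_of_mul_lt_mul_left (a := f)
        rw [hmul]; omega
      refine ⟨⟨he2, ?_⟩, Nat.div_dvd_of_dvd hdvd, ?_⟩
      · have : (N / f) * (N / f) < N := by nlinarith [helt, hmul, he1]
        have := Nat.le_sqrt.mpr (Nat.le_of_lt this)
        omega
      · rw [Nat.div_div_self hdvd hN0]
        omega
    · intro e he
      simp only [Finset.mem_filter, Finset.mem_Ico] at he
      exact Nat.div_div_self he.2.1 hN0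
    · intro f hf
      simp only [Finset.mem_filter, Finset.mem_Ico] at hf
      exact Nat.div_div_self hf.1.2 hN0
    · intro e _
      rfl
  rw [hlarge]
  push_cast
  ring

-- Per-number agreement: A's inner fold (started at 0) equals B's √-bounded divisor sum, for every Int i.
lemma pvInner_eq (i : Int) :
    (PySem.List.pyRange 1 i 1).foldl
      (fun s j => if PySem.Int.mod i j = 0 then s + j else s) 0
    = pvProperDivSum i := by
  by_cases hi : i < 2
  · rw [PySem.List.pyRange_one_eq_nil (by omega)]
    unfold pvProperDivSum
    rw [if_pos hi]
    rfl
  · have hN : i = ((i.toNat : Nat) : Int) := by omega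
    have hN2 : 2 ≤ i.toNat := by omega
    rw [hN, pvA_inner_fold i.toNat i.toNat 0]
    unfold pvProperDivSum
    rw [if_neg (by omega)]
    rw [pvSigmaLoop_sum i.toNat (Nat.sqrt i.toNat + 1 - 2) 2 1 (by omega) rfl]
    rw [pvPairing i.toNat hN2]
    unfold pvGsum
    ring

-- ===== VERDICT (by name: the statement is the Claim_ definition above) =====
theorem concatenate_abundants_from_range_spec : Claim_equal_concatenate_abundants_from_range := by
  intro p k _
  unfold Spec_concatenate_abundants_from_range
  unfold concatenate_abundants_from_range concatenate_abundants_from_range_alt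
  generalize PySem.List.pyRange p (k + 1) 1 = l
  suffices h : ∀ (acc : Int),
      (l.foldl (fun (st : Int × Int) i =>
        let suma := (PySem.List.pyRange 1 i 1).foldl
          (fun s j => if PySem.Int.mod i j = 0 then s + j else s) st.1
        if suma > i then (0, st.2 * 100 + i) else (0, st.2)) (0, acc)).2
      = l.foldl (fun acc i => if pvProperDivSum i > i then acc * 100 + i else acc) acc by
    exact h 0
  induction l with
  | nil => intro acc; rfl
  | cons x xs ih =>
    intro acc
    simp only [List.foldl_cons]
    rw [pvInner_eq x]
    by_cases hx : pvProperDivSum x > x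
    · simp only [if_pos hx]; exact ih (acc * 100 + x)
    · simp only [if_neg hx]; exact ih acc
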